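-- pv_equiv track=rewrite | github.com/Ajdorr/advent_of_code2019 | day16/run.py | fft_light
-- ===== SOURCE A (Python) =====
-- def fft_light(in_arr, sig_rep, phase_cnt, offset):
--   arr_mod = (in_arr * sig_rep)[offset:][::-1]
--   for _ in range(phase_cnt):
--     total = 0
--     for i, v in enumerate(arr_mod):
--       total = (total + v) % 10
--       arr_mod[i] = total
--
--   return arr_mod[::-1]
-- ===== SOURCE B (Python) =====
-- def fft_light(in_arr, sig_rep, phase_cnt, offset):
--   rev = (in_arr * sig_rep)[offset:][::-1]
--   totals = [0] * phase_cnt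
--   out = []
--   for v in rev:
--     x = v
--     for p in range(len(totals)):
--       totals[p] = (totals[p] + x) % 10
--       x = totals[p]
--     out.append(x)
--   out.reverse()
--   return out
-- ===== Notes on version B (the rewrite author's own statement) =====
-- stated objective: alternative
-- what changed: B transposes the two loops: instead of phase_cnt full passes rewriting the array in place, it makes a single pass over the reversed signal maintaining a column of per-phase running totals, emitting each output element directly.
import Mathlib
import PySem

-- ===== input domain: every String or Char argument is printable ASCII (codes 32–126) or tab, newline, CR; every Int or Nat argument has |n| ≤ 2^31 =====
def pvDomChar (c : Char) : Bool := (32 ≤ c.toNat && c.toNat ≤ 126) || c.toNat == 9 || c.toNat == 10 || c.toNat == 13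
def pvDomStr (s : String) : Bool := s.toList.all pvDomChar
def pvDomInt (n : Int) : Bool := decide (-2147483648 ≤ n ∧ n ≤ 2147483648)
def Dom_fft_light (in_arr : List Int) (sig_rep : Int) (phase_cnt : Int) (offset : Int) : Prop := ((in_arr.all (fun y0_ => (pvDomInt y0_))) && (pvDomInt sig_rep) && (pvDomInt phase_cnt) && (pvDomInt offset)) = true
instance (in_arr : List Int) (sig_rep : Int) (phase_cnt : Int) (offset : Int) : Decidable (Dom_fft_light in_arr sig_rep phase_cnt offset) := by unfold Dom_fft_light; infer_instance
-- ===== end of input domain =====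

-- B transposes A's loops: one pass over the signal with a column of per-phase running totals
-- instead of phase_cnt in-place passes; same cost, different traversal (objective: alternative).

-- ===== PORT A =====
-- inner loop 'for i, v in enumerate(arr_mod): total = (total+v)%10; arr_mod[i] = total':
-- each position is read before it is written, so the in-place pass is this scan.
def pvPhaseA (total : Int) : List Int → List Int
  | [] => []
  | v :: rest =>
    let t := PySem.Int.mod (total + v) 10
    t :: pvPhaseA t rest

def fft_light (in_arr : List Int) (sig_rep : Int) (phase_cnt : Int) (offset : Int) : List Int :=
  -- (in_arr * sig_rep)[offset:][::-1]  ([::-1] is reverse, PySem.List.slice?_none_none_neg_one)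
  let arr_mod := (PySem.List.slice (PySem.List.pyRepeat in_arr sig_rep) (some offset) none).reverse
  let arr_mod := (PySem.List.pyRange 0 phase_cnt 1).foldl (fun a _ => pvPhaseA 0 a) arr_mod
  arr_mod.reverse

-- ===== PORT B =====
-- inner loop of B: feed x through the column of totals; returns (updated totals, final x)
def pvColStep (x : Int) : List Int → List Int × Int
  | [] => ([], x)
  | t :: ts =>
    let t' := PySem.Int.mod (t + x) 10
    let r := pvColStep t' ts
    (t' :: r.1, r.2)

-- outer loop of B: 'for v in rev: … out.append(x)'
def pvBLoop (totals : List Int) : List Int → List Int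
  | [] => []
  | v :: rest =>
    let s := pvColStep v totals
    s.2 :: pvBLoop s.1 rest

def fft_light_alt (in_arr : List Int) (sig_rep : Int) (phase_cnt : Int) (offset : Int) : List Int :=
  let rev := (PySem.List.slice (PySem.List.pyRepeat in_arr sig_rep) (some offset) none).reverse
  let totals := List.replicate phase_cnt.toNat 0   -- [0] * phase_cnt
  (pvBLoop totals rev).reverse

-- ===== PRECONDITION & SPEC =====
def Spec_fft_light (in_arr : List Int) (sig_rep : Int) (phase_cnt : Int) (offset : Int) (out : List Int) : Prop := out = fft_light_alt in_arr sig_rep phase_cnt offset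
instance (in_arr : List Int) (sig_rep : Int) (phase_cnt : Int) (offset : Int) (out : List Int) : Decidable (Spec_fft_light in_arr sig_rep phase_cnt offset out) := by unfold Spec_fft_light; infer_instance

-- ===== CLAIM (what is proved, stated in full; the proofs are below) =====
def Claim_equal_fft_light : Prop := ∀ (in_arr : List Int) (sig_rep : Int) (phase_cnt : Int) (offset : Int), Dom_fft_light in_arr sig_rep phase_cnt offset → Spec_fft_light in_arr sig_rep phase_cnt offset (fft_light in_arr sig_rep phase_cnt offset)

-- ===== LEMMAS AND PROOFS =====

-- A's outer loop, generalized: run one pvPhaseA pass per entry of a list of initial totals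
def pvIterG : List Int → List Int → List Int
  | [], l => l
  | t :: ts, l => pvIterG ts (pvPhaseA t l)

theorem pvIterG_nil (ts : List Int) : pvIterG ts [] = [] := by
  induction ts with
  | nil => rfl
  | cons t ts ih => simpa [pvIterG, pvPhaseA] using ih

theorem pvIterG_cons (ts : List Int) (v : Int) (l : List Int) :
    pvIterG ts (v :: l) = (pvColStep v ts).2 :: pvIterG (pvColStep v ts).1 l := by
  induction ts generalizing v l with
  | nil => rfl
  | cons t ts ih =>
    simp only [pvIterG, pvPhaseA, pvColStep]
    exact ih _ _

theorem pvBLoop_eq_iterG (l ts : List Int) : pvBLoop ts l = pvIterG ts l := by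
  induction l generalizing ts with
  | nil => simp [pvBLoop, pvIterG_nil]
  | cons v l ih => simp [pvBLoop, ih, pvIterG_cons]

theorem pvFoldl_const_eq_iterG (xs : List Int) (l : List Int) :
    xs.foldl (fun a _ => pvPhaseA 0 a) l = pvIterG (List.replicate xs.length 0) l := by
  induction xs generalizing l with
  | nil => rfl
  | cons x xs ih => simpa [List.replicate, pvIterG] using ih (pvPhaseA 0 l)

-- ===== VERDICT (by name: the statement is the Claim_ definition above) =====
theorem fft_light_spec : Claim_equal_fft_light := by
  intro in_arr sig_rep phase_cnt offset _
  simp only [Spec_fft_light, fft_light, fft_light_alt, pvFoldl_const_eq_iterG,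
    pvBLoop_eq_iterG, PySem.List.length_pyRange_one, Int.sub_zero]
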